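-- pv_equiv track=rewrite | github.com/csyhhu/LeetCodePratice | Weekly-Contest/216/5607-Ways-to-Make-a-Fair-Array.py | waysToMakeFair_TLE
-- ===== SOURCE A (Python) =====
-- def waysToMakeFair_TLE(nums):
--
--     n = len(nums)
--     n_fair_idx = 0
--     for i in range(n):
--         left_value = nums.pop(i)
--         odd_sum = 0
--         even_sum = 0
--         for j in range(n-1):
--             if j % 2 == 0:
--                 even_sum += nums[j]
--             else:
--                 odd_sum += nums[j]
--         if even_sum == odd_sum:
--             n_fair_idx += 1
--         nums.insert(i, left_value)
--     return n_fair_idx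
-- ===== SOURCE B (Python) =====
-- def waysToMakeFair_TLE(nums):
--     even_total = 0
--     odd_total = 0
--     for i, x in enumerate(nums):
--         if i % 2 == 0:
--             even_total += x
--         else:
--             odd_total += x
--     pref_even = 0
--     pref_odd = 0
--     count = 0
--     for i, x in enumerate(nums):
--         if i % 2 == 0:
--             even_total -= x
--         else:
--             odd_total -= x
--         # after removing index i the suffix parities flip
--         if pref_even + odd_total == pref_odd + even_total:
--             count += 1
--         if i % 2 == 0:
--             pref_even += x
--         else:
--             pref_odd += x
--     return count
-- ===== Notes on version B (the rewrite author's own statement) =====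
-- stated objective: faster
-- what changed: A pops each index and re-sums the remaining list by parity (nested loops); B computes even/odd totals once and sweeps a single pass maintaining prefix/suffix even-odd sums, so the inner re-summation disappears.
import Mathlib
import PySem

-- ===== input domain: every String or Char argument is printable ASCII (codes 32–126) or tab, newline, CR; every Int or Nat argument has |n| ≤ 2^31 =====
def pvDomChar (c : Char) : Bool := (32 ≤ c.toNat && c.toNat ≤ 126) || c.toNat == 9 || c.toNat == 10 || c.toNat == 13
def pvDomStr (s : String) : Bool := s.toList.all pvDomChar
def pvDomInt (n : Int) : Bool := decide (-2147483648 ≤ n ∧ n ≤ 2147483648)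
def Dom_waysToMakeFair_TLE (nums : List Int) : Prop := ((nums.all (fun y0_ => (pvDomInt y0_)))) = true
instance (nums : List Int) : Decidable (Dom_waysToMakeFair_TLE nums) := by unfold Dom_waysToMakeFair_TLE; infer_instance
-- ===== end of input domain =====

-- B replaces A's O(n^2) remove-and-resum scan with one O(n) pass over running
-- even/odd prefix and suffix sums (A pops and re-inserts but leaves nums unchanged on return;
-- B does not touch it — the claim is about the return value).

-- ===== PORT A =====
-- Literal port of A: for each i pop nums[i], re-sum the remaining list by index
-- parity, compare, re-insert.  Inner state is (odd_sum, even_sum) in Python's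
-- declaration order; the `none` arm of pop? is unreachable (0 ≤ i < len nums).
def waysToMakeFair_TLE (nums : List Int) : Int :=
  let n : Int := (nums.length : Int)
  ((PySem.List.pyRange 0 n 1).foldl (fun (st : List Int × Int) i =>
      match PySem.List.pop? st.1 i with
      | none => st   -- unreachable: every i of range(n) is a valid index
      | some (leftValue, rest) =>
        let sums : Int × Int := (PySem.List.pyRange 0 (n - 1) 1).foldl
          (fun (p : Int × Int) j =>
            if PySem.Int.mod j 2 == 0 then (p.1, p.2 + PySem.List.pyGetD rest j 0)
            else (p.1 + PySem.List.pyGetD rest j 0, p.2)) ((0 : Int), (0 : Int))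
        let nFair : Int := if sums.2 == sums.1 then st.2 + 1 else st.2
        (PySem.List.insert rest i leftValue, nFair))
    (nums, (0 : Int))).2

-- ===== PORT B =====
-- Literal port of B (Source B): one pass computing even/odd totals, then one pass
-- keeping (even_total, odd_total, pref_even, pref_odd, count).
def waysToMakeFair_TLE_alt (nums : List Int) : Int :=
  let tot : Int × Int := (PySem.List.enumerate nums).foldl
    (fun (p : Int × Int) ix =>
      if PySem.Int.mod ix.1 2 == 0 then (p.1 + ix.2, p.2) else (p.1, p.2 + ix.2))
    ((0 : Int), (0 : Int))
  let res : Int × Int × Int × Int × Int := (PySem.List.enumerate nums).foldl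
    (fun (st : Int × Int × Int × Int × Int) ix =>
      let et : Int := if PySem.Int.mod ix.1 2 == 0 then st.1 - ix.2 else st.1
      let ot : Int := if PySem.Int.mod ix.1 2 == 0 then st.2.1 else st.2.1 - ix.2
      let c : Int := if st.2.2.1 + ot == st.2.2.2.1 + et then st.2.2.2.2 + 1 else st.2.2.2.2
      let pe : Int := if PySem.Int.mod ix.1 2 == 0 then st.2.2.1 + ix.2 else st.2.2.1
      let po : Int := if PySem.Int.mod ix.1 2 == 0 then st.2.2.2.1 else st.2.2.2.1 + ix.2
      (et, ot, pe, po, c))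
    (tot.1, tot.2, (0 : Int), (0 : Int), (0 : Int))
  res.2.2.2.2

-- ===== PRECONDITION & SPEC =====
def Spec_waysToMakeFair_TLE (nums : List Int) (out : Int) : Prop := out = waysToMakeFair_TLE_alt nums
instance (nums : List Int) (out : Int) : Decidable (Spec_waysToMakeFair_TLE nums out) := by unfold Spec_waysToMakeFair_TLE; infer_instance

-- ===== CLAIM (what is proved, stated in full; the proofs are below) =====
def Claim_equal_waysToMakeFair_TLE : Prop := ∀ (nums : List Int), Dom_waysToMakeFair_TLE nums → Spec_waysToMakeFair_TLE nums (waysToMakeFair_TLE nums)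

-- ===== LEMMAS AND PROOFS =====
def altSums : List Int → Int × Int
  | [] => (0, 0)
  | x :: xs => (x + (altSums xs).2, (altSums xs).1)

theorem mod_two_succ (s : Int) : PySem.Int.mod (s + 1) 2 = 1 - PySem.Int.mod s 2 := by
  rw [PySem.Int.mod_eq_emod_of_pos (by norm_num), PySem.Int.mod_eq_emod_of_pos (by norm_num)]
  omega

theorem innerA_gen (t : List Int) : ∀ (s o e : Int),
    (PySem.List.enumerate t s).foldl
      (fun (p : Int × Int) ix =>
        if PySem.Int.mod ix.1 2 == 0 then (p.1, p.2 + ix.2) else (p.1 + ix.2, p.2)) (o, e)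
    = if PySem.Int.mod s 2 = 0 then (o + (altSums t).2, e + (altSums t).1)
      else (o + (altSums t).1, e + (altSums t).2) := by
  induction t with
  | nil =>
    intro s o e
    simp only [PySem.List.enumerate, List.foldl_nil, altSums]
    split <;> simp
  | cons x xs ih =>
    intro s o e
    rw [PySem.List.enumerate_cons, List.foldl_cons]
    rcases PySem.Int.mod_two_eq s with h | h
    · rw [h]
      rw [if_pos (show ((0:Int) == 0) = true by decide)]
      rw [if_pos rfl]
      rw [ih, mod_two_succ, h]
      rw [if_neg (by norm_num)]
      simp only [altSums, Prod.mk.injEq]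
      constructor <;> first | trivial | ring
    · rw [h]
      rw [if_neg (show ¬(((1:Int) == 0) = true) by decide)]
      rw [if_neg (by norm_num)]
      rw [ih, mod_two_succ, h]
      rw [if_pos (by norm_num)]
      simp only [altSums, Prod.mk.injEq]
      constructor <;> first | trivial | ring

theorem innerA (rest : List Int) :
    (PySem.List.pyRange 0 (rest.length : Int) 1).foldl
      (fun (p : Int × Int) j =>
        if PySem.Int.mod j 2 == 0 then (p.1, p.2 + PySem.List.pyGetD rest j 0)
        else (p.1 + PySem.List.pyGetD rest j 0, p.2)) ((0 : Int), (0 : Int))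
    = ((altSums rest).2, (altSums rest).1) := by
  have h := innerA_gen rest 0 0 0
  rw [PySem.List.enumerate_eq_map_pyRange rest 0, List.foldl_map] at h
  simp only [PySem.List.len_eq] at h
  rw [h]
  norm_num

theorem insert_eraseIdx_self (xs : List Int) (k : Nat) (h : k < xs.length) :
    PySem.List.insert (xs.eraseIdx k) (k : Int) (xs[k]) = xs := by
  have h1 : (xs.take k).length = k := by simp [List.length_take]; omega
  rw [PySem.List.insert_natCast _ _ _ (by rw [List.length_eraseIdx_of_lt h]; omega)]
  rw [List.eraseIdx_eq_take_drop_succ]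
  rw [List.take_append_of_le_length (le_of_eq h1.symm), List.take_take, min_self]
  rw [List.drop_left' h1]
  conv_rhs => rw [← List.take_append_drop k xs]
  rw [List.drop_eq_getElem_cons h]

theorem pyRange_shift (m : Nat) :
    PySem.List.pyRange 1 ((m : Int) + 1) 1 = (PySem.List.pyRange 0 (m : Int) 1).map (· + 1) := by
  induction m with
  | zero => decide
  | succ n ih =>
    push_cast
    rw [PySem.List.pyRange_one_succ_right (a := 1) (b := (n:Int)+1) (by omega),
        PySem.List.pyRange_one_succ_right (a := 0) (b := (n:Int)) (by omega)]
    rw [ih, List.map_append]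
    simp [add_comm]

def cntA : Int → List Int → Int
  | _, [] => 0
  | d, x :: xs => (if (altSums xs).1 + d = (altSums xs).2 then 1 else 0) + cntA (-(x + d)) xs

theorem cnt_eq (xs : List Int) : ∀ (d : Int),
    ((PySem.List.pyRange 0 (xs.length : Int) 1).map
      (fun i => if (altSums (xs.eraseIdx i.toNat)).1 + d = (altSums (xs.eraseIdx i.toNat)).2
                then (1 : Int) else 0)).sum = cntA d xs := by
  induction xs with
  | nil =>
    intro d
    simp [cntA, show PySem.List.pyRange 0 0 1 = [] from rfl]
  | cons x xs ih =>
    intro d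
    have hlen : ((x :: xs).length : Int) = (xs.length : Int) + 1 := by push_cast [List.length_cons]; ring
    rw [hlen, PySem.List.pyRange_one_cons (by omega), List.map_cons, List.sum_cons]
    rw [show (0:Int) + 1 = 1 from rfl, pyRange_shift, List.map_map]
    have hmap : ∀ i ∈ PySem.List.pyRange 0 (xs.length : Int) 1,
        ((fun i => if (altSums ((x :: xs).eraseIdx i.toNat)).1 + d = (altSums ((x :: xs).eraseIdx i.toNat)).2
                  then (1 : Int) else 0) ∘ (· + 1)) i
        = (fun i => if (altSums (xs.eraseIdx i.toNat)).1 + (-(x + d)) = (altSums (xs.eraseIdx i.toNat)).2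
                  then (1 : Int) else 0) i := by
      intro i hi
      rcases PySem.List.mem_pyRange_one.1 hi with ⟨h0, _⟩
      simp only [Function.comp]
      have ht : (i + 1).toNat = i.toNat + 1 := by omega
      rw [ht, List.eraseIdx_cons_succ]
      refine if_congr ?_ rfl rfl
      simp only [altSums]
      constructor <;> intro hh <;> linarith
    rw [List.map_congr_left hmap, ih]
    simp only [Int.toNat_zero, List.eraseIdx_cons_zero, cntA]
    rfl

theorem stepA_eval (nums : List Int) (i c : Int) (h0 : 0 ≤ i) (hlt : i < (nums.length : Int)) :
    (fun (st : List Int × Int) i =>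
      match PySem.List.pop? st.1 i with
      | none => st
      | some (leftValue, rest) =>
        let sums : Int × Int := (PySem.List.pyRange 0 ((nums.length : Int) - 1) 1).foldl
          (fun (p : Int × Int) j =>
            if PySem.Int.mod j 2 == 0 then (p.1, p.2 + PySem.List.pyGetD rest j 0)
            else (p.1 + PySem.List.pyGetD rest j 0, p.2)) ((0 : Int), (0 : Int))
        let nFair : Int := if sums.2 == sums.1 then st.2 + 1 else st.2
        (PySem.List.insert rest i leftValue, nFair)) (nums, c) i
    = (nums, c + if (altSums (nums.eraseIdx i.toNat)).1 + 0 = (altSums (nums.eraseIdx i.toNat)).2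
                 then (1 : Int) else 0) := by
  have hi : i.toNat < nums.length := by omega
  have hi2 : i = ((i.toNat : Nat) : Int) := by omega
  simp only []
  rw [hi2, PySem.List.pop?_natCast _ _ hi]
  simp only []
  have hb : (nums.length : Int) - 1 = ((nums.eraseIdx i.toNat).length : Int) := by
    rw [List.length_eraseIdx_of_lt hi]; push_cast; omega
  rw [hb, innerA, insert_eraseIdx_self _ _ hi]
  simp only [beq_iff_eq, Prod.mk.injEq, true_and, Int.toNat_natCast]
  by_cases hc : (altSums (nums.eraseIdx i.toNat)).1 + 0 = (altSums (nums.eraseIdx i.toNat)).2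
  · rw [if_pos (by linarith), if_pos hc]
  · rw [if_neg (by intro hh; exact hc (by linarith)), if_neg hc]
    exact (add_zero c).symm

theorem outerA (nums : List Int) : ∀ (idxs : List Int) (c : Int),
    (∀ i ∈ idxs, 0 ≤ i ∧ i < (nums.length : Int)) →
    idxs.foldl (fun (st : List Int × Int) i =>
      match PySem.List.pop? st.1 i with
      | none => st
      | some (leftValue, rest) =>
        let sums : Int × Int := (PySem.List.pyRange 0 ((nums.length : Int) - 1) 1).foldl
          (fun (p : Int × Int) j =>
            if PySem.Int.mod j 2 == 0 then (p.1, p.2 + PySem.List.pyGetD rest j 0)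
            else (p.1 + PySem.List.pyGetD rest j 0, p.2)) ((0 : Int), (0 : Int))
        let nFair : Int := if sums.2 == sums.1 then st.2 + 1 else st.2
        (PySem.List.insert rest i leftValue, nFair)) (nums, c)
    = (nums, c + (idxs.map (fun i =>
        if (altSums (nums.eraseIdx i.toNat)).1 + 0 = (altSums (nums.eraseIdx i.toNat)).2
        then (1 : Int) else 0)).sum) := by
  intro idxs
  induction idxs with
  | nil => intro c _; simp
  | cons i idxs ih =>
    intro c h
    have hi := h i (by simp)
    rw [List.foldl_cons]
    have hstep := stepA_eval nums i c hi.1 hi.2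
    dsimp only at hstep ⊢
    rw [hstep, ih _ (fun j hj => h j (List.mem_cons_of_mem _ hj))]
    simp [add_assoc]

theorem A_eq_cntA (nums : List Int) : waysToMakeFair_TLE nums = cntA 0 nums := by
  simp only [waysToMakeFair_TLE]
  have h := outerA nums (PySem.List.pyRange 0 (nums.length : Int) 1) 0
    (fun i hi => PySem.List.mem_pyRange_one.1 hi)
  dsimp only at h ⊢
  rw [h]
  have h2 := cnt_eq nums 0
  rw [h2] at *
  simp

theorem totB_gen (t : List Int) : ∀ (s e o : Int),
    (PySem.List.enumerate t s).foldl
      (fun (p : Int × Int) ix =>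
        if PySem.Int.mod ix.1 2 == 0 then (p.1 + ix.2, p.2) else (p.1, p.2 + ix.2)) (e, o)
    = if PySem.Int.mod s 2 = 0 then (e + (altSums t).1, o + (altSums t).2)
      else (e + (altSums t).2, o + (altSums t).1) := by
  induction t with
  | nil =>
    intro s e o
    simp only [PySem.List.enumerate, List.foldl_nil, altSums]
    split <;> simp
  | cons x xs ih =>
    intro s e o
    rw [PySem.List.enumerate_cons, List.foldl_cons]
    rcases PySem.Int.mod_two_eq s with h | h
    · rw [h]
      rw [if_pos (show ((0:Int) == 0) = true by decide)]
      rw [if_pos rfl]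
      rw [ih, mod_two_succ, h]
      rw [if_neg (by norm_num)]
      simp only [altSums, Prod.mk.injEq]
      constructor <;> first | trivial | ring
    · rw [h]
      rw [if_neg (show ¬(((1:Int) == 0) = true) by decide)]
      rw [if_neg (by norm_num)]
      rw [ih, mod_two_succ, h]
      rw [if_pos (by norm_num)]
      simp only [altSums, Prod.mk.injEq]
      constructor <;> first | trivial | ring

theorem mainB (t : List Int) : ∀ (s pe po c : Int),
    ((PySem.List.enumerate t s).foldl
      (fun (st : Int × Int × Int × Int × Int) ix =>
        let et : Int := if PySem.Int.mod ix.1 2 == 0 then st.1 - ix.2 else st.1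
        let ot : Int := if PySem.Int.mod ix.1 2 == 0 then st.2.1 else st.2.1 - ix.2
        let c : Int := if st.2.2.1 + ot == st.2.2.2.1 + et then st.2.2.2.2 + 1 else st.2.2.2.2
        let pe : Int := if PySem.Int.mod ix.1 2 == 0 then st.2.2.1 + ix.2 else st.2.2.1
        let po : Int := if PySem.Int.mod ix.1 2 == 0 then st.2.2.2.1 else st.2.2.2.1 + ix.2
        (et, ot, pe, po, c))
      ((if PySem.Int.mod s 2 = 0 then (altSums t).1 else (altSums t).2),
       (if PySem.Int.mod s 2 = 0 then (altSums t).2 else (altSums t).1),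
       pe, po, c)).2.2.2.2
    = c + cntA (if PySem.Int.mod s 2 = 0 then pe - po else po - pe) t := by
  induction t with
  | nil =>
    intro s pe po c
    simp [PySem.List.enumerate, cntA]
  | cons x xs ih =>
    intro s pe po c
    rw [PySem.List.enumerate_cons, List.foldl_cons]
    rcases PySem.Int.mod_two_eq s with h | h
    · rw [h]
      dsimp only
      simp only [beq_self_eq_true, eq_self_iff_true, ite_true]
      rw [show (altSums (x :: xs)).1 - x = (altSums xs).2 from by simp only [altSums]; ring]
      rw [show (altSums (x :: xs)).2 = (altSums xs).1 from by simp only [altSums]]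
      rw [show (if (pe + (altSums xs).1 == po + (altSums xs).2) = true then c + 1 else c)
            = (if (altSums xs).1 + (pe - po) = (altSums xs).2 then c + 1 else c) from by
        simp only [beq_iff_eq]
        exact if_congr (by constructor <;> intro <;> linarith) rfl rfl]
      have h1 : PySem.Int.mod (s + 1) 2 = 1 := by rw [mod_two_succ, h]; ring
      have ih' := ih (s + 1) (pe + x) po
        (if (altSums xs).1 + (pe - po) = (altSums xs).2 then c + 1 else c)
      rw [h1] at ih'
      rw [if_neg (one_ne_zero), if_neg (one_ne_zero), if_neg (one_ne_zero)] at ih'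
      rw [ih']
      rw [show po - (pe + x) = -(x + (pe - po)) from by ring]
      simp only [cntA]
      split_ifs <;> ring
    · rw [h]
      dsimp only
      simp only [show ((1:Int) == 0) = false from by decide, Bool.false_eq_true, if_false,
                 if_neg (show ¬((1:Int) = 0) by decide)]
      rw [show (altSums (x :: xs)).1 = x + (altSums xs).2 from by simp only [altSums]]
      rw [show (altSums (x :: xs)).2 = (altSums xs).1 from by simp only [altSums]]
      rw [show x + (altSums xs).2 - x = (altSums xs).2 from by ring]
      rw [show (if (pe + (altSums xs).2 == po + (altSums xs).1) = true then c + 1 else c)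
            = (if (altSums xs).1 + (po - pe) = (altSums xs).2 then c + 1 else c) from by
        simp only [beq_iff_eq]
        exact if_congr (by constructor <;> intro <;> linarith) rfl rfl]
      have h1 : PySem.Int.mod (s + 1) 2 = 0 := by rw [mod_two_succ, h]; ring
      have ih' := ih (s + 1) pe (po + x)
        (if (altSums xs).1 + (po - pe) = (altSums xs).2 then c + 1 else c)
      rw [h1] at ih'
      simp only [eq_self_iff_true, ite_true] at ih'
      rw [ih']
      rw [show pe - (po + x) = -(x + (po - pe)) from by ring]
      simp only [cntA]
      split_ifs <;> ring

theorem B_eq_cntA (nums : List Int) : waysToMakeFair_TLE_alt nums = cntA 0 nums := by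
  simp only [waysToMakeFair_TLE_alt]
  have h0 : PySem.Int.mod 0 2 = 0 := by decide
  have ht := totB_gen nums 0 0 0
  rw [h0] at ht
  simp only [ite_true, zero_add] at ht
  have hm := mainB nums 0 0 0 0
  rw [h0] at hm
  simp only [ite_true, zero_add, sub_zero] at hm
  rw [ht]
  exact hm

-- ===== VERDICT (by name: the statement is the Claim_ definition above) =====
theorem waysToMakeFair_TLE_spec : Claim_equal_waysToMakeFair_TLE := by
  intro nums _
  unfold Spec_waysToMakeFair_TLE
  rw [A_eq_cntA, B_eq_cntA]
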